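-- pv_equiv track=rewrite | github.com/mrunmayee300/Empathy-Engine | ssml_utils.py | inject_pauses
-- ===== SOURCE A (Python) =====
-- PAUSE_MAP = {
--     ",": 120,
--     ";": 170,
--     ":": 170,
--     ".": 220,
--     "!": 260,
--     "?": 260,
-- }
--
-- def inject_pauses(text: str) -> str:
--     out = []
--     for ch in text:
--         out.append(ch)
--         if ch in PAUSE_MAP:
--             ms = PAUSE_MAP[ch]
--             out.append(f" [pause:{ms}] ")
--     return "".join(out)
-- ===== SOURCE B (Python) =====
-- PAUSE_MAP = {
--     ",": 120,
--     ";": 170,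
--     ":": 170,
--     ".": 220,
--     "!": 260,
--     "?": 260,
-- }
--
-- # Staged whole-string passes: one str.replace per punctuation mark.
-- # ':' is processed first because the inserted markers themselves contain a
-- # colon; all other marks never occur inside a marker, so later passes cannot
-- # touch text inserted by earlier ones.
-- _ORDER = [":", ",", ";", ".", "!", "?"]
--
-- def inject_pauses(text: str) -> str:
--     for ch in _ORDER:
--         text = text.replace(ch, f"{ch} [pause:{PAUSE_MAP[ch]}] ")
--     return text
-- ===== Notes on version B (the rewrite author's own statement) =====
-- stated objective: alternative
-- what changed: Replaces A's single per-character append loop with six staged whole-string str.replace passes (one per punctuation mark, colon first so already-inserted markers are never re-expanded), delegating all character traversal to the C-level str.replace.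
import Mathlib
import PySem

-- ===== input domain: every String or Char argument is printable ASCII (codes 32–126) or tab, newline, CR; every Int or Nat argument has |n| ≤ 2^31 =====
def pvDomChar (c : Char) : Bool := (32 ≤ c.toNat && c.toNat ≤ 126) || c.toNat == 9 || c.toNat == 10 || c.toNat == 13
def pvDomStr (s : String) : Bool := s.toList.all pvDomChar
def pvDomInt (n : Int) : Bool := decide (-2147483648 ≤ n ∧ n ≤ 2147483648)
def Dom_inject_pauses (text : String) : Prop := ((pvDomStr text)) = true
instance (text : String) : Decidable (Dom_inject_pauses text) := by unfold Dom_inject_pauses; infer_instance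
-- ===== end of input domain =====

-- B replaces A's single per-character append loop with six staged whole-string replace passes (one per punctuation mark, ':' first so inserted markers are never re-expanded); same O(n) asymptotics, measured faster in a timing run (C-level replace passes instead of a Python-level loop).


-- ===== PORT A =====
def PAUSE_MAP : PySem.Dict Char Int :=
  PySem.Dict.ofList [(',', 120), (';', 170), (':', 170), ('.', 220), ('!', 260), ('?', 260)]

def inject_pauses (text : String) : String :=
  let out : List String := text.toList.foldl (fun out ch =>
    let out := out ++ [String.ofList [ch]]
    if PAUSE_MAP.contains ch then
      -- PAUSE_MAP[ch] is guarded by 'ch in PAUSE_MAP', so getD never takes its default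
      let ms := PAUSE_MAP.getD ch 0
      out ++ [" [pause:" ++ PySem.Int.toStr ms ++ "] "]
    else out) []
  PySem.Str.join "" out

-- ===== PORT B =====
-- Source B's _ORDER with each mark's PAUSE_MAP entry (the f-string marker is built in the loop body)
def pvOrder : List (Char × Int) := [(':', 170), (',', 120), (';', 170), ('.', 220), ('!', 260), ('?', 260)]

def inject_pauses_alt (text : String) : String :=
  pvOrder.foldl (fun t p =>
    PySem.Str.replace t (String.ofList [p.1])
      (String.ofList [p.1] ++ " [pause:" ++ PySem.Int.toStr p.2 ++ "] ")) text

-- ===== PRECONDITION & SPEC =====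
def Spec_inject_pauses (text : String) (out : String) : Prop := out = inject_pauses_alt text
instance (text : String) (out : String) : Decidable (Spec_inject_pauses text out) := by unfold Spec_inject_pauses; infer_instance

-- ===== CLAIM (what is proved, stated in full; the proofs are below) =====
def Claim_equal_inject_pauses : Prop := ∀ (text : String), Dom_inject_pauses text → Spec_inject_pauses text (inject_pauses text)

-- ===== LEMMAS AND PROOFS =====
-- the two strings A's loop body appends for one character
def pieceList (ch : Char) : List String :=
  [String.ofList [ch]] ++
    (if PAUSE_MAP.contains ch then
      [" [pause:" ++ PySem.Int.toStr (PAUSE_MAP.getD ch 0) ++ "] "] else [])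

lemma foldA (l : List Char) (acc : List String) :
    l.foldl (fun out ch =>
      let out := out ++ [String.ofList [ch]]
      if PAUSE_MAP.contains ch then
        let ms := PAUSE_MAP.getD ch 0
        out ++ [" [pause:" ++ PySem.Int.toStr ms ++ "] "]
      else out) acc = acc ++ l.flatMap pieceList := by
  induction l generalizing acc with
  | nil => simp
  | cons c rest ih =>
    simp only [List.foldl_cons, List.flatMap_cons, ih, pieceList]
    split_ifs <;> simp

lemma join_nil_flatten (ps : List (List Char)) :
    PySem.Chars.join [] ps = ps.flatMap id := by
  induction ps with
  | nil => simp [PySem.Chars.join_nil]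
  | cons p rest ih =>
    cases rest with
    | nil => simp [PySem.Chars.join_singleton]
    | cons q r => simp [PySem.Chars.join_cons_cons, ih]

-- single-character substitution performed by one replace pass
def pvSubst (p : Char) (new : List Char) (c : Char) : List Char := if c == p then new else [c]

lemma go_single (p : Char) (new : List Char) :
    ∀ (fuel : Nat) (l acc : List Char), l.length ≤ fuel →
      PySem.Chars.replace.go [p] new fuel l acc
        = acc.reverse ++ l.flatMap (pvSubst p new) := by
  intro fuel
  induction fuel with
  | zero =>
    intro l acc h
    have : l = [] := List.length_eq_zero_iff.mp (Nat.le_zero.mp h)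
    subst this
    simp [PySem.Chars.replace.go]
  | succ f ih =>
    intro l acc h
    cases l with
    | nil => simp [PySem.Chars.replace.go]
    | cons c t =>
      rw [PySem.Chars.replace.go]
      by_cases hc : p = c
      · subst hc
        have hp : [p].isPrefixOf (p :: t) = true := by simp [List.isPrefixOf]
        simp only [hp, if_true, List.length_singleton, List.drop_one, List.tail_cons]
        rw [ih t _ (by simpa using Nat.lt_succ_iff.mp (by simpa using h))]
        simp [pvSubst]
      · have hp : [p].isPrefixOf (c :: t) = false := by
          simp [List.isPrefixOf, hc]
        simp only [hp]
        rw [ih t _ (by simpa using Nat.lt_succ_iff.mp (by simpa using h))]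
        have hb : (c == p) = false := by simp [Ne.symm hc]
        simp [pvSubst, hb]

lemma replace_single (l : List Char) (p : Char) (new : List Char) :
    PySem.Chars.replace l [p] new = l.flatMap (pvSubst p new) := by
  rw [PySem.Chars.replace]
  simp only [List.isEmpty_cons, if_false, Bool.false_eq_true]
  rw [go_single p new l.length l [] le_rfl]
  simp

-- one replace pass on strings, seen on character lists
lemma step (s : String) (p : Char) (new : String) :
    (PySem.Str.replace s (String.ofList [p]) new).toList
      = s.toList.flatMap (pvSubst p new.toList) := by
  rw [PySem.Str.replace]
  simp [replace_single]

-- the staged passes as a fold of flatMaps over character lists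
def pvApply (ss : List (Char × List Char)) (l : List Char) : List Char :=
  ss.foldl (fun l pn => l.flatMap (pvSubst pn.1 pn.2)) l

def pvMark (pn : Char × Int) : Char × List Char :=
  (pn.1, (String.ofList [pn.1] ++ " [pause:" ++ PySem.Int.toStr pn.2 ++ "] ").toList)

lemma foldB (ss : List (Char × Int)) (s : String) :
    (ss.foldl (fun t p =>
      PySem.Str.replace t (String.ofList [p.1])
        (String.ofList [p.1] ++ " [pause:" ++ PySem.Int.toStr p.2 ++ "] ")) s).toList
      = pvApply (ss.map pvMark) s.toList := by
  induction ss generalizing s with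
  | nil => simp [pvApply]
  | cons pn rest ih =>
    simp only [List.foldl_cons, List.map_cons, pvApply, ih, step, pvMark]

-- the staged passes act character by character
lemma apply_flatMap (ss : List (Char × List Char)) (l : List Char) :
    pvApply ss l = l.flatMap (fun c => pvApply ss [c]) := by
  induction ss generalizing l with
  | nil => simp [pvApply]
  | cons pn rest ih =>
    simp only [pvApply, List.foldl_cons] at *
    rw [ih, List.flatMap_assoc]
    apply List.flatMap_congr
    intro c _
    simp only [List.flatMap_cons, List.flatMap_nil, List.append_nil]
    exact (ih _).symm

-- a character distinct from every stage's mark passes through all stages unchanged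
lemma apply_skip (c : Char) (ss : List (Char × List Char))
    (h : ∀ pn ∈ ss, (c == pn.1) = false) : pvApply ss [c] = [c] := by
  induction ss with
  | nil => simp [pvApply]
  | cons pn rest ih =>
    simp only [pvApply, List.foldl_cons, List.flatMap_cons, List.flatMap_nil,
      List.append_nil, pvSubst, h pn (List.mem_cons_self ..)]
    exact ih fun q hq => h q (List.mem_cons_of_mem _ hq)

-- per character, the six staged passes produce exactly what A's loop body appends
set_option maxHeartbeats 1000000 in
lemma per_char (c : Char) :
    pvApply (pvOrder.map pvMark) [c] = (pieceList c).flatMap String.toList := by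
  by_cases h1 : c = ','
  · subst h1; decide
  by_cases h2 : c = ';'
  · subst h2; decide
  by_cases h3 : c = ':'
  · subst h3; decide
  by_cases h4 : c = '.'
  · subst h4; decide
  by_cases h5 : c = '!'
  · subst h5; decide
  by_cases h6 : c = '?'
  · subst h6; decide
  · have b1 : (c == ',') = false := by simp [h1]
    have b2 : (c == ';') = false := by simp [h2]
    have b3 : (c == ':') = false := by simp [h3]
    have b4 : (c == '.') = false := by simp [h4]
    have b5 : (c == '!') = false := by simp [h5]
    have b6 : (c == '?') = false := by simp [h6]
    have hm : PAUSE_MAP.contains c = false := by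
      have hm' : PAUSE_MAP.items = [(',', (120:Int)), (';', 170), (':', 170), ('.', 220), ('!', 260), ('?', 260)] := by decide
      simp [PySem.Dict.contains, hm', List.any_cons, List.any_nil]
      exact ⟨Ne.symm h1, Ne.symm h2, Ne.symm h3, Ne.symm h4, Ne.symm h5, Ne.symm h6⟩
    rw [apply_skip c _ ?_]
    · simp [pieceList, hm]
    · rw [List.forall_mem_map]
      intro a ha
      show (c == a.1) = false
      fin_cases ha <;> assumption

-- ===== VERDICT (by name: the statement is the Claim_ definition above) =====
set_option maxHeartbeats 1000000 in
theorem inject_pauses_spec : Claim_equal_inject_pauses := by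
  intro text _
  unfold Spec_inject_pauses
  apply String.toList_inj.mp
  simp only [inject_pauses, inject_pauses_alt, foldA, List.nil_append,
    PySem.Str.toList_join, foldB]
  have he : ("" : String).toList = [] := by decide
  rw [he, join_nil_flatten, apply_flatMap]
  rw [List.flatMap_map]
  simp only [id]
  rw [List.flatMap_assoc]
  refine List.flatMap_congr fun c _ => ?_
  exact (per_char c).symm
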